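-- pv_equiv track=rewrite | github.com/AtlasOrionL/orion-vision-core | experimental/gaming_ai/conflict_resolution.py | _check_resource_conflict
-- ===== SOURCE A (Python) =====
-- from typing import Dict, List, Any, Optional, Tuple, Callable
--
-- def _check_resource_conflict(decisions: List[Dict[str, Any]]) -> bool:
--     """Check for resource conflicts"""
--     requested_resources = []
--
--     for decision in decisions:
--         resources = decision.get("required_resources", [])
--         for resource in resources:
--             if resource in requested_resources:
--                 return True  # Same resource requested by multiple agents
--             requested_resources.append(resource)
--
--     return False
-- ===== SOURCE B (Python) =====
-- def _check_resource_conflict(decisions):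
--     """Check for resource conflicts"""
--     all_resources = [resource
--                      for decision in decisions
--                      for resource in decision.get("required_resources", [])]
--     return len(all_resources) != len(set(all_resources))
-- ===== Notes on version B (the rewrite author's own statement) =====
-- stated objective: simpler
-- what changed: Replaces A's streaming loop with an early return and a growing membership list by one flat list of all requested resources and a single length-vs-set-length comparison.
import Mathlib
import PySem

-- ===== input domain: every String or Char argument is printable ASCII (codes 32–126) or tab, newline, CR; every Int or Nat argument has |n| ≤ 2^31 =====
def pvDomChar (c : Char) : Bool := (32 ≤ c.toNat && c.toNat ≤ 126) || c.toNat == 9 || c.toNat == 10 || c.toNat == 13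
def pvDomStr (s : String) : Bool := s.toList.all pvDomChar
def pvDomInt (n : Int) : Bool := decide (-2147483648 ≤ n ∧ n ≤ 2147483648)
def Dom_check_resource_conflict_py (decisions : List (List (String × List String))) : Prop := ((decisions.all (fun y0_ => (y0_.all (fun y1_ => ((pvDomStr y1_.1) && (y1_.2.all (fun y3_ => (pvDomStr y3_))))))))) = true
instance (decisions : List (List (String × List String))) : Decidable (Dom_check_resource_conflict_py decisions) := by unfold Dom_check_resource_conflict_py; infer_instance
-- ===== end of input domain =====

-- B changes the algorithm: instead of A's streaming scan with an early return and a growing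
-- membership list, it flattens all requested resources into one list and compares its length
-- with the length of its set (simpler decomposition, same result).

-- decision.get("required_resources", []) on an association list (first match, default [])
def crcGetRR (d : List (String × List String)) : List String :=
  (List.lookup "required_resources" d).getD []

-- ===== PORT A =====
-- inner 'for resource in resources' loop: none = early 'return True', some req = updated requested_resources
def crcA_inner (resources : List String) (requested : List String) : Option (List String) :=
  match resources with
  | [] => some requested
  | r :: rs => if requested.contains r then none else crcA_inner rs (requested ++ [r])

-- outer 'for decision in decisions' loop carrying requested_resources
def crcA_loop (decisions : List (List (String × List String))) (requested : List String) : Bool :=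
  match decisions with
  | [] => false
  | d :: ds =>
    match crcA_inner (crcGetRR d) requested with
    | none => true
    | some requested' => crcA_loop ds requested'

def check_resource_conflict_py (decisions : List (List (String × List String))) : Bool :=
  crcA_loop decisions []

-- ===== PORT B =====
def check_resource_conflict_py_alt (decisions : List (List (String × List String))) : Bool :=
  let all_resources := decisions.flatMap (fun d => crcGetRR d)
  !(all_resources.length == (PySem.Set.ofList all_resources).length)

-- ===== PRECONDITION & SPEC =====
def Spec_check_resource_conflict_py (decisions : List (List (String × List String))) (out : Bool) : Prop := out = check_resource_conflict_py_alt decisions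
instance (decisions : List (List (String × List String))) (out : Bool) : Decidable (Spec_check_resource_conflict_py decisions out) := by unfold Spec_check_resource_conflict_py; infer_instance

-- ===== CLAIM (what is proved, stated in full; the proofs are below) =====
def Claim_equal_check_resource_conflict_py : Prop := ∀ (decisions : List (List (String × List String))), Dom_check_resource_conflict_py decisions → Spec_check_resource_conflict_py decisions (check_resource_conflict_py decisions)

-- ===== LEMMAS AND PROOFS =====

-- the inner loop, started on duplicate-free requested, succeeds exactly when requested ++ resources
-- is duplicate-free, and then returns their append
theorem crcA_inner_eq (resources requested : List String) (h : requested.Nodup) :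
    crcA_inner resources requested =
      if (requested ++ resources).Nodup then some (requested ++ resources) else none := by
  induction resources generalizing requested with
  | nil => simp [crcA_inner, h]
  | cons r rs ih =>
      simp only [crcA_inner]
      by_cases hmem : r ∈ requested
      · have : ¬ (requested ++ r :: rs).Nodup := by
          intro hnd
          exact (List.disjoint_of_nodup_append hnd) hmem List.mem_cons_self
        simp [hmem, this]
      · have hc : requested.contains r = false := by simpa using hmem
        have h1 : (requested ++ [r]).Nodup := by
          rw [List.nodup_append]
          refine ⟨h, List.nodup_singleton r, ?_⟩
          intro a ha b hb
          have hb' : b = r := by simpa using hb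
          subst hb'
          exact fun he => hmem (he ▸ ha)
        rw [hc]
        simp only [Bool.false_eq_true, if_false, ih (requested ++ [r]) h1]
        have : requested ++ [r] ++ rs = requested ++ r :: rs := by simp
        rw [this]

theorem crcA_loop_eq (decisions : List (List (String × List String))) (requested : List String)
    (h : requested.Nodup) :
    crcA_loop decisions requested =
      !decide ((requested ++ decisions.flatMap (fun d => crcGetRR d)).Nodup) := by
  induction decisions generalizing requested with
  | nil => simp [crcA_loop, h]
  | cons d ds ih =>
      simp only [crcA_loop, crcA_inner_eq _ _ h]
      by_cases hn : (requested ++ crcGetRR d).Nodup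
      · rw [if_pos hn]
        refine (ih _ hn).trans ?_
        rw [List.flatMap_cons, List.append_assoc]
      · rw [if_neg hn]
        have hna : ¬ (requested ++ (crcGetRR d ++ ds.flatMap (fun d => crcGetRR d))).Nodup := by
          intro hall
          apply hn
          have hsub : (requested ++ crcGetRR d).Sublist
              (requested ++ (crcGetRR d ++ ds.flatMap (fun d => crcGetRR d))) := by
            rw [← List.append_assoc]
            exact List.sublist_append_left _ _
          exact hall.sublist hsub
        simp [List.flatMap_cons, hna]

-- set(xs) has the same length as xs exactly when xs has no duplicates
theorem length_ofList_eq_iff (xs : List String) :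
    (PySem.Set.ofList xs).length = xs.length ↔ xs.Nodup := by
  constructor
  · induction xs with
    | nil => simp
    | cons x xs ih =>
        intro h
        rw [PySem.Set.ofList_cons] at h
        simp only [List.length_cons, Nat.succ_inj] at h
        have hd_le : (PySem.Set.discard (PySem.Set.ofList xs) x).length ≤ (PySem.Set.ofList xs).length := by
          simpa only [PySem.Set.discard] using
            List.length_filter_le (fun y => !y == x) (PySem.Set.ofList xs)
        have hle := PySem.Set.length_ofList_le (xs := xs)
        have hx : x ∉ xs := by
          intro hx
          have hx' : x ∈ PySem.Set.ofList xs := by simpa [PySem.Set.mem_ofList] using hx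
          have hlt : (PySem.Set.discard (PySem.Set.ofList xs) x).length < (PySem.Set.ofList xs).length := by
            simp only [PySem.Set.discard]
            exact List.length_filter_lt_length_iff_exists.mpr ⟨x, hx', by simp⟩
          omega
        have hnd : xs.Nodup := ih (by omega)
        exact List.nodup_cons.mpr ⟨hx, hnd⟩
  · intro h
    rw [PySem.Set.ofList_eq_self_of_nodup xs h]

theorem crc_alt_eq (decisions : List (List (String × List String))) :
    check_resource_conflict_py_alt decisions =
      !decide ((decisions.flatMap (fun d => crcGetRR d)).Nodup) := by
  unfold check_resource_conflict_py_alt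
  set all := decisions.flatMap (fun d => crcGetRR d) with hall
  by_cases h : all.Nodup
  · have := (length_ofList_eq_iff all).mpr h
    simp [this, h]
  · have hne : (PySem.Set.ofList all).length ≠ all.length := fun he => h ((length_ofList_eq_iff all).mp he)
    simp [h, Ne.symm hne]

-- ===== VERDICT (by name: the statement is the Claim_ definition above) =====
theorem check_resource_conflict_py_spec : Claim_equal_check_resource_conflict_py := by
  intro decisions _
  unfold Spec_check_resource_conflict_py check_resource_conflict_py
  rw [crcA_loop_eq _ _ List.nodup_nil, crc_alt_eq]
  simp
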